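-- pv_equiv track=rewrite | github.com/theabbie/leetcode | miscellaneous/E_Living_Sequence.py | count
-- ===== SOURCE A (Python) =====
-- def count(num):
--     num = str(num)
--     n = len(num)
--     prev = [1, 1]
--     for i in range(n - 1, -1, -1):
--         curr = [0, 0]
--         for tight in range(2):
--             maxdigit = 9
--             if tight:
--                 maxdigit = int(num[i])
--             if maxdigit == 4:
--                 curr[tight] += 4 * prev[0]
--             elif maxdigit > 4:
--                 curr[tight] += (maxdigit - 1) * prev[0]
--                 curr[tight] += prev[tight]
--             else:
--                 curr[tight] += maxdigit * prev[0]
--                 curr[tight] += prev[tight]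
--         prev = curr
--     return prev[1]
-- ===== SOURCE B (Python) =====
-- def count(num):
--     s = str(num)
--     n = len(s)
--     total = 0
--     exact = True
--     for i, ch in enumerate(s):
--         d = int(ch)
--         total += (d if d <= 4 else d - 1) * 9 ** (n - 1 - i)
--         if d == 4:
--             exact = False
--             break
--     return total + (1 if exact else 0)
-- ===== Notes on version B (the rewrite author's own statement) =====
-- stated objective: simpler
-- what changed: Replaced the backward two-state (tight/free) digit DP over suffixes with a single forward pass that adds a closed-form count (allowed digits below d) * 9^remaining per position and breaks at the first digit 4.
import Mathlib
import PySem

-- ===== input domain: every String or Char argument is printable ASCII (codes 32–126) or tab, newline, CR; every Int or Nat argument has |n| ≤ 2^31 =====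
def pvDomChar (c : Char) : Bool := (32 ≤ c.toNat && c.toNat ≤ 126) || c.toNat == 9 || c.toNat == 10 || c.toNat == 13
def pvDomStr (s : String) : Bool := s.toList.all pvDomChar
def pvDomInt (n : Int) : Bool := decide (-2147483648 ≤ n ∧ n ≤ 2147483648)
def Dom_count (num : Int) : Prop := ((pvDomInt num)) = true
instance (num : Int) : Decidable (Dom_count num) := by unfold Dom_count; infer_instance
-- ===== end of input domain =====

-- B replaces the backward two-state digit DP with a forward per-digit closed-form sum ("simpler").


-- ===== PORT A =====
-- int(<one-char string>); getD 0 is never reached inside Pre_count (Python raises there)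
def pvDig (c : Char) : Int := (PySem.Int.ofChars? [c]).getD 0

-- int(num[i]): index, then int
def pvDigAt (cs : List Char) (i : Int) : Int :=
  ((PySem.List.pyGet? cs i).bind (fun c => PySem.Int.ofChars? [c])).getD 0

-- body of the inner 'for tight in range(2)' loop: the value written into curr[tight]
def countTight (cs : List Char) (prev : Int × Int) (i tight : Int) : Int :=
  let maxdigit : Int := if tight ≠ 0 then pvDigAt cs i else 9
  if maxdigit = 4 then 4 * prev.1
  else if maxdigit > 4 then (maxdigit - 1) * prev.1 + (if tight ≠ 0 then prev.2 else prev.1)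
  else maxdigit * prev.1 + (if tight ≠ 0 then prev.2 else prev.1)

def count (num : Int) : Int :=
  let cs := PySem.Int.toChars num
  let n : Int := cs.length
  let final := (PySem.List.pyRange (n - 1) (-1) (-1)).foldl
    (fun prev i => (countTight cs prev i 0, countTight cs prev i 1)) (1, 1)
  final.2

-- ===== PORT B =====
-- forward loop of Source B: acc + per-position counts; break at digit 4 (no final +1)
def pvGoB : List Char → Int → Int
  | [], acc => acc + 1
  | c :: t, acc =>
    let d := pvDig c
    let acc2 := acc + (if d ≤ 4 then d else d - 1) * (9 : Int) ^ t.length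
    if d = 4 then acc2 else pvGoB t acc2

def count_alt (num : Int) : Int := pvGoB (PySem.Int.toChars num) 0

-- ===== PRECONDITION & SPEC =====
-- For num < 0, str(num) starts with '-' and int('-') raises ValueError in both A and B.
def Pre_count (num : Int) : Prop := 0 ≤ num
instance (num : Int) : Decidable (Pre_count num) := by unfold Pre_count; infer_instance
def pvWitness_count : Int := 45

def Spec_count (num : Int) (out : Int) : Prop := out = count_alt num
instance (num : Int) (out : Int) : Decidable (Spec_count num out) := by unfold Spec_count; infer_instance

-- ===== CLAIM (what is proved, stated in full; the proofs are below) =====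
def Claim_equal_count : Prop := ∀ (num : Int), Dom_count num → Pre_count num → Spec_count num (count num)

-- ===== LEMMAS AND PROOFS =====

theorem pvGoB_acc (cs : List Char) (a : Int) : pvGoB cs a = a + pvGoB cs 0 := by
  induction cs generalizing a with
  | nil => simp [pvGoB]
  | cons c t ih =>
    simp only [pvGoB]
    by_cases h4 : pvDig c = 4
    · simp [h4]
    · by_cases h5 : pvDig c ≤ 4
      · simp only [if_neg h4, if_pos h5]
        rw [ih, ih (0 + pvDig c * 9 ^ t.length)]
        ring
      · simp only [if_neg h4, if_neg h5]
        rw [ih, ih (0 + (pvDig c - 1) * 9 ^ t.length)]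
        ring

theorem pv_fold_inv (cs : List Char) (j : Nat) (hj : j ≤ cs.length) :
    (PySem.List.pyRange ((j : Int) - 1) (-1) (-1)).foldl
      (fun prev i => (countTight cs prev i 0, countTight cs prev i 1))
      ((9 : Int) ^ (cs.length - j), pvGoB (cs.drop j) 0)
    = ((9 : Int) ^ cs.length, pvGoB cs 0) := by
  induction j with
  | zero =>
    rw [PySem.List.pyRange_neg_one_eq_nil (by norm_num)]
    simp
  | succ j ih =>
    have hjl : j < cs.length := hj
    have hco : ((j + 1 : Nat) : Int) - 1 = (j : Int) := by push_cast; ring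
    rw [hco, PySem.List.pyRange_neg_one_cons (by omega), List.foldl_cons]
    have hstep : (countTight cs ((9 : Int) ^ (cs.length - (j + 1)), pvGoB (cs.drop (j + 1)) 0) (j : Int) 0,
                  countTight cs ((9 : Int) ^ (cs.length - (j + 1)), pvGoB (cs.drop (j + 1)) 0) (j : Int) 1)
        = ((9 : Int) ^ (cs.length - j), pvGoB (cs.drop j) 0) := by
      have hdrop : cs.drop j = cs[j] :: cs.drop (j + 1) := List.drop_eq_getElem_cons hjl
      have hdig : pvDigAt cs (j : Int) = pvDig cs[j] := by
        simp [pvDigAt, pvDig, PySem.List.pyGet?_natCast, List.getElem?_eq_getElem hjl,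
          Option.bind]
      have hpow : (cs.length - (j + 1)) + 1 = cs.length - j := by omega
      have hlen : (cs.drop (j + 1)).length = cs.length - (j + 1) := by simp
      simp only [Prod.mk.injEq]
      refine ⟨?_, ?_⟩
      · -- tight = 0 component: 8*p0 + p0 = 9^(len-j)
        simp only [countTight]
        norm_num
        rw [← hpow, pow_succ]
        ring
      · -- tight = 1 component
        simp only [countTight, hdig]
        norm_num
        rw [hdrop]
        simp only [pvGoB, hlen]
        rcases lt_trichotomy (pvDig cs[j]) 4 with h | h | h
        · rw [if_neg (by omega), if_neg (by omega), if_neg (by omega), if_pos (by omega)]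
          conv_rhs => rw [pvGoB_acc]
          ring
        · simp only [h]
          norm_num
        · rw [if_neg (by omega), if_pos h, if_neg (by omega), if_neg (by omega)]
          conv_rhs => rw [pvGoB_acc]
          ring
    rw [hstep, ih (by omega)]

theorem count_eq_alt (num : Int) : count num = count_alt num := by
  unfold count count_alt
  have h := pv_fold_inv (PySem.Int.toChars num) (PySem.Int.toChars num).length (le_refl _)
  simp only [Nat.sub_self, pow_zero, List.drop_length, pvGoB, zero_add] at h
  simp only [h]

-- ===== VERDICT (by name: the statement is the Claim_ definition above) =====
theorem count_spec : Claim_equal_count := by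
  intro num _ _
  unfold Spec_count
  exact count_eq_alt num
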